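-- pv_equiv track=rewrite | github.com/qubasehq/qudata | src/qudata/clean/comprehensive_preprocessor.py | _normalize_code_style
-- ===== SOURCE A (Python) =====
-- def _normalize_code_style(content: str) -> str:
--     """Basic code style normalization."""
--     # Normalize indentation to 4 spaces
--     content = content.expandtabs(4)
--
--     # Remove trailing whitespace
--     lines = content.split('\n')
--     cleaned_lines = [line.rstrip() for line in lines]
--
--     # Remove excessive blank lines
--     result_lines = []
--     blank_count = 0
--
--     for line in cleaned_lines:
--         if not line.strip():
--             blank_count += 1
--             if blank_count <= 2:  # Max 2 consecutive blank lines
--                 result_lines.append(line)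
--         else:
--             blank_count = 0
--             result_lines.append(line)
--
--     return '\n'.join(result_lines)
-- ===== SOURCE B (Python) =====
-- def _normalize_code_style(content: str) -> str:
--     """Basic code style normalization (stateless rewrite: shifted-zip filter)."""
--     lines = [line.rstrip() for line in content.expandtabs(4).split('\n')]
--     kept = [cur for cur, p1, p2 in zip(lines, ['.'] + lines, ['.', '.'] + lines)
--             if cur.strip() or p1.strip() or p2.strip()]
--     return '\n'.join(kept)
-- ===== Notes on version B (the rewrite author's own statement) =====
-- stated objective: alternative
-- what changed: Replaces A's stateful pass (a running blank_count counter that decides which blank lines to keep) with a stateless shifted-zip filter: each line is kept iff it or one of its two predecessor lines (via zip with the twice-shifted line list) is non-blank.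
import Mathlib
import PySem

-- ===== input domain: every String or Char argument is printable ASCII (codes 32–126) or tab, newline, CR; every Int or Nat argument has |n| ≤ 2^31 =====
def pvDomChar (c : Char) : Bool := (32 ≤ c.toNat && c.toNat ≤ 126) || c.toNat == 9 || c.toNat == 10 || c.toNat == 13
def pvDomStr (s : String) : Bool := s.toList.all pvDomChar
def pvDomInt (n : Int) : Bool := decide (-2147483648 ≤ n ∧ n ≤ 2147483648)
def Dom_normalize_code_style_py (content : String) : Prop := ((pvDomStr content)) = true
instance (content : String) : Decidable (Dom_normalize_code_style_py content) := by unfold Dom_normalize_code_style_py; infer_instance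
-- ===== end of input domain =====

-- B replaces A's stateful blank-line counter loop by a stateless shifted-zip filter
-- (each line is kept by looking at the two previous lines); objective: alternative.


-- ===== PORT A =====
-- str.expandtabs(4), hand-ported (PySem has no expandtabs): exact CPython semantics —
-- a column counter that '\n'/'\r' reset and '\t' advances to the next multiple of 4.
-- Both Pythons call this same builtin, so both ports share this helper.
def pvExpandTabs4 : List Char → Nat → List Char
  | [], _ => []
  | c :: rest, col =>
    if c = '\t' then
      List.replicate (4 - col % 4) ' ' ++ pvExpandTabs4 rest (col + (4 - col % 4))
    else if c = '\n' ∨ c = '\r' then c :: pvExpandTabs4 rest 0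
    else c :: pvExpandTabs4 rest (col + 1)

def normalize_code_style_py (content : String) : String :=
  -- content = content.expandtabs(4)
  let cs := pvExpandTabs4 content.toList 0
  -- lines = content.split('\n'); cleaned_lines = [line.rstrip() for line in lines]
  let cleaned := (PySem.Chars.splitOn cs ['\n']).map PySem.Chars.rstrip
  -- result_lines = []; blank_count = 0; for line in cleaned_lines: …
  let st := cleaned.foldl
    (fun (st : Nat × List (List Char)) line =>
      if PySem.Chars.strip line = [] then
        let bc := st.1 + 1
        if bc ≤ 2 then (bc, st.2 ++ [line]) else (bc, st.2)
      else (0, st.2 ++ [line]))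
    (0, [])
  -- return '\n'.join(result_lines)
  String.ofList (PySem.Chars.join ['\n'] st.2)

-- ===== PORT B =====
def normalize_code_style_py_alt (content : String) : String :=
  -- lines = [line.rstrip() for line in content.expandtabs(4).split('\n')]
  let lines := (PySem.Chars.splitOn (pvExpandTabs4 content.toList 0) ['\n']).map PySem.Chars.rstrip
  -- kept = [cur for cur, p1, p2 in zip(lines, ['.'] + lines, ['.', '.'] + lines) if …]
  let kept := ((lines.zip ((['.'] :: lines).zip (['.'] :: ['.'] :: lines))).filter
    (fun t => !decide (PySem.Chars.strip t.1 = []) || !decide (PySem.Chars.strip t.2.1 = [])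
              || !decide (PySem.Chars.strip t.2.2 = []))).map (·.1)
  -- return '\n'.join(kept)
  String.ofList (PySem.Chars.join ['\n'] kept)

-- ===== PRECONDITION & SPEC =====
def Spec_normalize_code_style_py (content : String) (out : String) : Prop := out = normalize_code_style_py_alt content
instance (content : String) (out : String) : Decidable (Spec_normalize_code_style_py content out) := by unfold Spec_normalize_code_style_py; infer_instance

-- ===== CLAIM (what is proved, stated in full; the proofs are below) =====
def Claim_equal_normalize_code_style_py : Prop := ∀ (content : String), Dom_normalize_code_style_py content → Spec_normalize_code_style_py content (normalize_code_style_py content)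

-- ===== LEMMAS AND PROOFS =====

-- The loop invariant: A's running blank counter cnt agrees with B's look-behind window
-- (b = previous line, c = the line before that) through the two iffs below.
lemma pv_fold_eq_zipfilter :
    ∀ (ls : List (List Char)) (b c : List Char) (cnt : Nat) (acc : List (List Char)),
      (0 < cnt ↔ PySem.Chars.strip b = []) →
      (1 < cnt ↔ (PySem.Chars.strip b = [] ∧ PySem.Chars.strip c = [])) →
      (ls.foldl
        (fun (st : Nat × List (List Char)) line =>
          if PySem.Chars.strip line = [] then
            let bc := st.1 + 1
            if bc ≤ 2 then (bc, st.2 ++ [line]) else (bc, st.2)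
          else (0, st.2 ++ [line]))
        (cnt, acc)).2
      = acc ++ ((ls.zip ((b :: ls).zip (c :: b :: ls))).filter
          (fun t => !decide (PySem.Chars.strip t.1 = []) || !decide (PySem.Chars.strip t.2.1 = [])
                    || !decide (PySem.Chars.strip t.2.2 = []))).map (·.1) := by
  intro ls
  induction ls with
  | nil => intro b c cnt acc _ _; simp
  | cons a ls ih =>
    intro b c cnt acc h1 h2
    simp only [List.foldl_cons, List.zip_cons_cons, List.filter_cons]
    by_cases ha : PySem.Chars.strip a = []
    · by_cases hk : cnt + 1 ≤ 2
      · have hb : ¬ (PySem.Chars.strip b = [] ∧ PySem.Chars.strip c = []) := by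
          intro hbc; exact absurd (h2.mpr hbc) (by omega)
        rw [if_pos ha]
        show (List.foldl _ (if cnt + 1 ≤ 2 then (cnt + 1, acc ++ [a]) else (cnt + 1, acc)) ls).2 = _
        rw [if_pos hk]
        rw [ih a b (cnt + 1) (acc ++ [a])
          (by constructor <;> intro _ <;> [exact ha; omega])
          (by constructor
              · intro h; exact ⟨ha, h1.mp (by omega)⟩
              · intro h; have := h1.mpr h.2; omega)]
        have hcond : (!decide (PySem.Chars.strip a = []) || !decide (PySem.Chars.strip b = [])
                || !decide (PySem.Chars.strip c = [])) = true := by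
          simp [ha]; by_contra hcon
          push Not at hcon
          exact hb ⟨hcon.1, hcon.2⟩
        rw [hcond]
        simp
      · have hbc : PySem.Chars.strip b = [] ∧ PySem.Chars.strip c = [] := h2.mp (by omega)
        rw [if_pos ha]
        show (List.foldl _ (if cnt + 1 ≤ 2 then (cnt + 1, acc ++ [a]) else (cnt + 1, acc)) ls).2 = _
        rw [if_neg hk]
        rw [ih a b (cnt + 1) acc
          (by constructor <;> intro _ <;> [exact ha; omega])
          (by constructor
              · intro _; exact ⟨ha, hbc.1⟩
              · intro _; omega)]
        have hcond : (!decide (PySem.Chars.strip a = []) || !decide (PySem.Chars.strip b = [])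
                || !decide (PySem.Chars.strip c = [])) = false := by
          simp [ha, hbc.1, hbc.2]
        rw [hcond]
        simp
    · rw [if_neg ha]
      rw [ih a b 0 (acc ++ [a])
        (by constructor <;> intro h <;> [omega; exact absurd h ha])
        (by constructor <;> intro h <;> [omega; exact absurd h.1 ha])]
      have : (!decide (PySem.Chars.strip a = []) || !decide (PySem.Chars.strip b = [])
              || !decide (PySem.Chars.strip c = [])) = true := by simp [ha]
      rw [this]
      simp

-- ===== VERDICT (by name: the statement is the Claim_ definition above) =====
theorem normalize_code_style_py_spec : Claim_equal_normalize_code_style_py := by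
  intro content _
  unfold Spec_normalize_code_style_py normalize_code_style_py normalize_code_style_py_alt
  simp only []
  rw [pv_fold_eq_zipfilter _ ['.'] ['.'] 0 [] (by decide) (by decide)]
  simp
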